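-- pv_equiv track=rewrite | github.com/PauloVictorSS/unicamp-mc102 | tarefa10/quase_palindromo.py | verifica_eh_k_quase_palindromo
-- ===== SOURCE A (Python) =====
-- def verifica_eh_k_quase_palindromo(k, palavra, palavra_inversa, posicao_atual):
--     """
--         Recebe uma palavra e a sua inversa e compara os caracteres de
--         mesma posição verificando se ela é 'k' quase palindromo
--     """
--
--     if k < 0:
--         return "nao"
--     elif posicao_atual < 0:
--         return "sim"
--
--     if palavra[posicao_atual] != palavra_inversa[posicao_atual]:
--         k -= 1
--
--     return verifica_eh_k_quase_palindromo(k, palavra, palavra_inversa, posicao_atual - 1)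
-- ===== SOURCE B (Python) =====
-- def verifica_eh_k_quase_palindromo(k, palavra, palavra_inversa, posicao_atual):
--     if k < 0:
--         return "nao"
--     if posicao_atual < 0:
--         return "sim"
--     mismatches = sum(1 for i in range(posicao_atual + 1)
--                      if palavra[i] != palavra_inversa[i])
--     return "sim" if mismatches <= k else "nao"
-- ===== Notes on version B (the rewrite author's own statement) =====
-- stated objective: alternative
-- what changed: Replaces the tail recursion that threads a decremented budget k position by position with a single direct count of mismatching positions over range(posicao_atual+1), then one comparison mismatches <= k.
import Mathlib
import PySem

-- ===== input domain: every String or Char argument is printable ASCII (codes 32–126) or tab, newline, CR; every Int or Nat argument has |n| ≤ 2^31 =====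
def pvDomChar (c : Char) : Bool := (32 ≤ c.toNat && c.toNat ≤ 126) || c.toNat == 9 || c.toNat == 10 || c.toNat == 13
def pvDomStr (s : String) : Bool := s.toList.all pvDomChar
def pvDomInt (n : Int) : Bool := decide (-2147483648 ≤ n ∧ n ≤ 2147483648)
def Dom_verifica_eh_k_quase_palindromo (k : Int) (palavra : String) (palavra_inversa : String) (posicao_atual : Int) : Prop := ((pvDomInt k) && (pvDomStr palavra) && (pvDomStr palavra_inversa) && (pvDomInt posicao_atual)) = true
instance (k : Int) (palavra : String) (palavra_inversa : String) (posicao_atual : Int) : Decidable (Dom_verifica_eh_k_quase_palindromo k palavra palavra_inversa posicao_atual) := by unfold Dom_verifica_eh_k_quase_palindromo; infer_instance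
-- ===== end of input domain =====

-- B replaces A's budget-threading tail recursion with a direct count of mismatching
-- positions followed by one comparison (objective: alternative decomposition).

-- ===== PORT A =====
-- Literal port of A's tail recursion; the out-of-range IndexError case (pyGet? = none)
-- is excluded by Pre_ and returns "" here.
def verifica_eh_k_quase_palindromo (k : Int) (palavra : String) (palavra_inversa : String) (posicao_atual : Int) : String :=
  if k < 0 then "nao"
  else if posicao_atual < 0 then "sim"
  else
    match PySem.Str.pyGet? palavra posicao_atual, PySem.Str.pyGet? palavra_inversa posicao_atual with
    | some a, some b =>
        verifica_eh_k_quase_palindromo (if a ≠ b then k - 1 else k) palavra palavra_inversa (posicao_atual - 1)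
    | _, _ => ""  -- Python raises IndexError here; outside Pre_
termination_by (posicao_atual + 1).toNat
decreasing_by omega

-- ===== PORT B =====
def verifica_eh_k_quase_palindromo_alt (k : Int) (palavra : String) (palavra_inversa : String) (posicao_atual : Int) : String :=
  if k < 0 then "nao"
  else if posicao_atual < 0 then "sim"
  else
    let mismatches : Int :=
      (PySem.List.pyRange 0 (posicao_atual + 1) 1).foldl (fun acc i =>
        if PySem.Str.pyGet? palavra i ≠ PySem.Str.pyGet? palavra_inversa i then acc + 1
        else acc) 0   -- Python raises IndexError on out-of-range i (pyGet? = none); outside Pre_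
    if mismatches ≤ k then "sim" else "nao"

-- ===== PRECONDITION & SPEC =====
-- Pre_ excludes exactly the inputs where Python A raises IndexError: k ≥ 0 and
-- 0 ≤ posicao_atual but posicao_atual out of range of either string.
def Pre_verifica_eh_k_quase_palindromo (k : Int) (palavra : String) (palavra_inversa : String) (posicao_atual : Int) : Prop :=
  k < 0 ∨ posicao_atual < 0 ∨ (posicao_atual < PySem.Str.len palavra ∧ posicao_atual < PySem.Str.len palavra_inversa)
instance (k : Int) (palavra : String) (palavra_inversa : String) (posicao_atual : Int) : Decidable (Pre_verifica_eh_k_quase_palindromo k palavra palavra_inversa posicao_atual) := by unfold Pre_verifica_eh_k_quase_palindromo; infer_instance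

def pvWitness_verifica_eh_k_quase_palindromo : Int × String × String × Int := (1, "abca", "acba", 3)

def Spec_verifica_eh_k_quase_palindromo (k : Int) (palavra : String) (palavra_inversa : String) (posicao_atual : Int) (out : String) : Prop := out = verifica_eh_k_quase_palindromo_alt k palavra palavra_inversa posicao_atual
instance (k : Int) (palavra : String) (palavra_inversa : String) (posicao_atual : Int) (out : String) : Decidable (Spec_verifica_eh_k_quase_palindromo k palavra palavra_inversa posicao_atual out) := by unfold Spec_verifica_eh_k_quase_palindromo; infer_instance

-- ===== CLAIM (what is proved, stated in full; the proofs are below) =====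
def Claim_equal_verifica_eh_k_quase_palindromo : Prop := ∀ (k : Int) (palavra : String) (palavra_inversa : String) (posicao_atual : Int), Dom_verifica_eh_k_quase_palindromo k palavra palavra_inversa posicao_atual → Pre_verifica_eh_k_quase_palindromo k palavra palavra_inversa posicao_atual → Spec_verifica_eh_k_quase_palindromo k palavra palavra_inversa posicao_atual (verifica_eh_k_quase_palindromo k palavra palavra_inversa posicao_atual)

-- ===== LEMMAS AND PROOFS =====

-- mismatch count over positions 0..pos (the fold inside the B port)
def pvCnt (p q : String) (pos : Int) : Int :=
  (PySem.List.pyRange 0 (pos + 1) 1).foldl (fun acc i =>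
    if PySem.Str.pyGet? p i ≠ PySem.Str.pyGet? q i then acc + 1
    else acc) 0

lemma pvCnt_neg (p q : String) (pos : Int) (h : pos < 0) : pvCnt p q pos = 0 := by
  unfold pvCnt
  rw [PySem.List.pyRange_one_eq_nil (by omega)]
  rfl

lemma pvFold_ge (p q : String) (l : List Int) (acc : Int) :
    acc ≤ l.foldl (fun acc i =>
      if PySem.Str.pyGet? p i ≠ PySem.Str.pyGet? q i then acc + 1
      else acc) acc := by
  induction l generalizing acc with
  | nil => simp
  | cons x xs ih =>
      simp only [List.foldl_cons]
      refine le_trans ?_ (ih _)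
      split <;> simp

lemma pvCnt_nonneg (p q : String) (pos : Int) : 0 ≤ pvCnt p q pos := pvFold_ge p q _ 0

lemma pvCnt_step (p q : String) (pos : Int) (h0 : 0 ≤ pos) :
    pvCnt p q pos = pvCnt p q (pos - 1)
      + (if PySem.Str.pyGet? p pos ≠ PySem.Str.pyGet? q pos then 1 else 0) := by
  unfold pvCnt
  rw [show pos - 1 + 1 = pos from by ring,
      PySem.List.pyRange_one_succ_right (by omega), List.foldl_append]
  simp only [List.foldl_cons, List.foldl_nil]
  split <;> simp

lemma pvMain (p q : String) : ∀ (n : Nat) (k pos : Int), pos < (n : Int) →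
    pos < PySem.Str.len p → pos < PySem.Str.len q →
    verifica_eh_k_quase_palindromo k p q pos = if pvCnt p q pos ≤ k then "sim" else "nao" := by
  intro n
  induction n with
  | zero =>
      intro k pos hn _ _
      have hneg : pos < 0 := by exact_mod_cast hn
      rw [pvCnt_neg p q pos hneg]
      unfold verifica_eh_k_quase_palindromo
      by_cases hk : k < 0
      · rw [if_pos hk, if_neg (by omega : ¬ (0:Int) ≤ k)]
      · rw [if_neg hk, if_pos hneg, if_pos (by omega : (0:Int) ≤ k)]
  | succ m ih =>
      intro k pos hn hp hq
      by_cases hneg : pos < 0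
      · rw [pvCnt_neg p q pos hneg]
        unfold verifica_eh_k_quase_palindromo
        by_cases hk : k < 0
        · rw [if_pos hk, if_neg (by omega : ¬ (0:Int) ≤ k)]
        · rw [if_neg hk, if_pos hneg, if_pos (by omega : (0:Int) ≤ k)]
      · have h0 : 0 ≤ pos := by omega
        have hlp : pos < (p.toList.length : Int) := by
          simpa [PySem.Str.len_eq] using hp
        have hlq : pos < (q.toList.length : Int) := by
          simpa [PySem.Str.len_eq] using hq
        obtain ⟨a, ha⟩ : ∃ a, PySem.Str.pyGet? p pos = some a := by
          rw [show pos = ((pos.toNat : Nat) : Int) from by omega, PySem.Str.pyGet?_natCast]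
          exact ⟨_, List.getElem?_eq_getElem (by omega)⟩
        obtain ⟨b, hb⟩ : ∃ b, PySem.Str.pyGet? q pos = some b := by
          rw [show pos = ((pos.toNat : Nat) : Int) from by omega, PySem.Str.pyGet?_natCast]
          exact ⟨_, List.getElem?_eq_getElem (by omega)⟩
        have hstep := pvCnt_step p q pos h0
        rw [ha, hb] at hstep
        simp only [ne_eq, Option.some.injEq] at hstep
        have hrec := ih (if a ≠ b then k - 1 else k) (pos - 1) (by omega) (by omega) (by omega)
        unfold verifica_eh_k_quase_palindromo
        rw [if_neg (by omega : ¬ pos < 0)]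
        by_cases hk : k < 0
        · rw [if_pos hk]
          have := pvCnt_nonneg p q pos
          rw [if_neg (by omega)]
        · rw [if_neg hk, ha, hb]
          simp only []
          rw [hrec]
          have hnn := pvCnt_nonneg p q (pos - 1)
          by_cases hab : a ≠ b
          · simp only [if_pos hab] at hstep ⊢
            by_cases hle : pvCnt p q pos ≤ k
            · rw [if_pos (by omega), if_pos hle]
            · rw [if_neg (by omega), if_neg hle]
          · simp only [if_neg hab] at hstep ⊢
            by_cases hle : pvCnt p q pos ≤ k
            · rw [if_pos (by omega), if_pos hle]
            · rw [if_neg (by omega), if_neg hle]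

-- ===== VERDICT (by name: the statement is the Claim_ definition above) =====
theorem verifica_eh_k_quase_palindromo_spec : Claim_equal_verifica_eh_k_quase_palindromo := by
  intro k p q pos _ hpre
  unfold Spec_verifica_eh_k_quase_palindromo verifica_eh_k_quase_palindromo_alt
  by_cases hk : k < 0
  · rw [if_pos hk]
    unfold verifica_eh_k_quase_palindromo
    rw [if_pos hk]
  · rw [if_neg hk]
    by_cases hneg : pos < 0
    · rw [if_pos hneg]
      unfold verifica_eh_k_quase_palindromo
      rw [if_neg hk, if_pos hneg]
    · rw [if_neg hneg]
      rcases hpre with h | h | ⟨h1, h2⟩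
      · omega
      · omega
      · have := pvMain p q (pos.toNat + 1) k pos (by omega) h1 h2
        rw [this]
        rfl
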